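-- pv_equiv track=rewrite | github.com/code-philia/CoEdPilot-extension | src/content_model.py | ContentModel
-- ===== SOURCE A (Python) =====
-- def ContentModel(codeWindow, commitMessage, prevEdits):
--     # extract the edit line from codeWindow
--     editLine = codeWindow.split('<s>')[1][1:-1].rstrip("\n\r")
--
--     replace_dict = {
--         'happy': 'sad',
--         'good': 'bad',
--         'car': 'bike',
--         'fly': 'dive'
--     }
--     for keyword, replacement in replace_dict.items():
--         editLine = editLine.replace(keyword, replacement)
--
--     return [editLine, editLine+'(2nd)', editLine+'(3rd)']
-- ===== SOURCE B (Python) =====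
-- def ContentModel(codeWindow, commitMessage, prevEdits):
--     # same extraction as the original
--     editLine = codeWindow.split('<s>')[1][1:-1].rstrip("\n\r")
--
--     # single left-to-right scan instead of four full replace passes
--     table = {'happy': 'sad', 'good': 'bad', 'car': 'bike', 'fly': 'dive'}
--     out = []
--     k = 0
--     n = len(editLine)
--     while k < n:
--         for kw, rep in table.items():
--             if editLine.startswith(kw, k):
--                 out.append(rep)
--                 k += len(kw)
--                 break
--         else:
--             out.append(editLine[k])
--             k += 1
--     editLine = ''.join(out)
--
--     return [editLine, editLine + '(2nd)', editLine + '(3rd)']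
-- ===== Notes on version B (the rewrite author's own statement) =====
-- stated objective: alternative
-- what changed: The four sequential full-string str.replace passes are replaced by one left-to-right scan that matches any of the four keywords at each position and emits the replacement (valid because keywords do not overlap and no replacement contains a keyword); the editLine extraction is unchanged.
import Mathlib
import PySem

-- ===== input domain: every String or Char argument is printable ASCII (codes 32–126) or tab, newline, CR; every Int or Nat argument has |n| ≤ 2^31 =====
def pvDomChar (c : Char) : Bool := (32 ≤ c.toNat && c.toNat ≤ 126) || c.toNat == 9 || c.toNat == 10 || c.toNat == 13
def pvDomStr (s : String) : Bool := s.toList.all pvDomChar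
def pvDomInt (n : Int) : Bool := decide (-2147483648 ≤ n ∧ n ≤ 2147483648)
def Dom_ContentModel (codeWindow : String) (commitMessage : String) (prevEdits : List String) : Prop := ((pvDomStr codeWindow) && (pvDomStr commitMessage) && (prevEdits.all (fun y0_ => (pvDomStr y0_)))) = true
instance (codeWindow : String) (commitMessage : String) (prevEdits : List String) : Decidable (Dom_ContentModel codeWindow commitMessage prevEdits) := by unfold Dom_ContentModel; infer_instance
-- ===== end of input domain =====

-- B replaces the four sequential full-string replace passes of A by one left-to-right scan
-- that matches the four keywords position by position (alternative algorithm, same cost class);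
-- the editLine extraction is the same as A's.


-- shared by both ports (the extraction line is literally identical in both Pythons):
-- editLine = codeWindow.split('<s>')[1][1:-1].rstrip("\n\r")
-- s.rstrip("\n\r") ported by hand (PySem.Chars.stripChars strips both sides): exact — drops trailing '\n'/'\r' only.
def pvRstripNR (s : List Char) : List Char :=
  (s.reverse.dropWhile (fun c => c == '\n' || c == '\r')).reverse

def pvExtract (codeWindow : String) : List Char :=
  let parts := PySem.Chars.splitOn codeWindow.toList ['<', 's', '>']
  -- parts[1]: none = IndexError when '<s>' is absent — those inputs are excluded by Pre_ContentModel
  let p1 := (PySem.List.pyGet? parts 1).getD []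
  pvRstripNR (PySem.Chars.slice p1 (some 1) (some (-1)))

-- ===== PORT A =====
def ContentModel (codeWindow : String) (commitMessage : String) (prevEdits : List String) : List String :=
  let editLine0 := pvExtract codeWindow
  -- for keyword, replacement in replace_dict.items(): editLine = editLine.replace(keyword, replacement)
  -- (items of the literal dict, in insertion order)
  let editLine :=
    [(['h','a','p','p','y'], ['s','a','d']),
     (['g','o','o','d'], ['b','a','d']),
     (['c','a','r'], ['b','i','k','e']),
     (['f','l','y'], ['d','i','v','e'])].foldl
      (fun acc kv => PySem.Chars.replace acc kv.1 kv.2) editLine0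
  [String.ofList editLine,
   String.ofList (editLine ++ ['(','2','n','d',')']),
   String.ofList (editLine ++ ['(','3','r','d',')'])]

-- ===== PORT B =====
-- the while-loop of Source B: one scan over the remaining characters; at each position try the four
-- keywords in table order, emit the replacement and jump, else copy the character
def scanRep : List Char → List Char
  | [] => []
  | c :: t =>
    if List.isPrefixOf ['h','a','p','p','y'] (c :: t) then
      ['s','a','d'] ++ scanRep (List.drop 5 (c :: t))
    else if List.isPrefixOf ['g','o','o','d'] (c :: t) then
      ['b','a','d'] ++ scanRep (List.drop 4 (c :: t))
    else if List.isPrefixOf ['c','a','r'] (c :: t) then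
      ['b','i','k','e'] ++ scanRep (List.drop 3 (c :: t))
    else if List.isPrefixOf ['f','l','y'] (c :: t) then
      ['d','i','v','e'] ++ scanRep (List.drop 3 (c :: t))
    else c :: scanRep t
termination_by l => l.length
decreasing_by all_goals (simp [List.length_drop]; try omega)

def ContentModel_alt (codeWindow : String) (commitMessage : String) (prevEdits : List String) : List String :=
  let editLine := scanRep (pvExtract codeWindow)
  [String.ofList editLine,
   String.ofList (editLine ++ ['(','2','n','d',')']),
   String.ofList (editLine ++ ['(','3','r','d',')'])]

-- ===== PRECONDITION & SPEC =====
-- A (and B) raise IndexError (split('<s>')[1]) when '<s>' does not occur in codeWindow; Pre_ excludes exactly those inputs.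
def Pre_ContentModel (codeWindow : String) (commitMessage : String) (prevEdits : List String) : Prop :=
  PySem.Str.isIn "<s>" codeWindow = true
instance (codeWindow : String) (commitMessage : String) (prevEdits : List String) : Decidable (Pre_ContentModel codeWindow commitMessage prevEdits) := by unfold Pre_ContentModel; infer_instance

def pvWitness_ContentModel : String × String × List String := ("a<s> happy car <s>b", "", [])

def Spec_ContentModel (codeWindow : String) (commitMessage : String) (prevEdits : List String) (out : List String) : Prop := out = ContentModel_alt codeWindow commitMessage prevEdits
instance (codeWindow : String) (commitMessage : String) (prevEdits : List String) (out : List String) : Decidable (Spec_ContentModel codeWindow commitMessage prevEdits out) := by unfold Spec_ContentModel; infer_instance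

-- ===== CLAIM (what is proved, stated in full; the proofs are below) =====
def Claim_equal_ContentModel : Prop := ∀ (codeWindow : String) (commitMessage : String) (prevEdits : List String), Dom_ContentModel codeWindow commitMessage prevEdits → Pre_ContentModel codeWindow commitMessage prevEdits → Spec_ContentModel codeWindow commitMessage prevEdits (ContentModel codeWindow commitMessage prevEdits)

-- ===== LEMMAS AND PROOFS =====
set_option maxRecDepth 4000

def repSpec (o0 : Char) (oRest new : List Char) : List Char → List Char
  | [] => []
  | c :: t =>
    if List.isPrefixOf (o0 :: oRest) (c :: t) then
      new ++ repSpec o0 oRest new (List.drop (oRest.length + 1) (c :: t))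
    else c :: repSpec o0 oRest new t
termination_by l => l.length
decreasing_by all_goals (simp [List.length_drop]; try omega)

lemma go_eq (o0 : Char) (oRest new : List Char) :
    ∀ (fuel : Nat) (l acc : List Char), l.length ≤ fuel →
      PySem.Chars.replace.go (o0 :: oRest) new fuel l acc = acc.reverse ++ repSpec o0 oRest new l := by
  intro fuel
  induction fuel with
  | zero =>
    intro l acc h
    have hl : l = [] := by cases l with | nil => rfl | cons a b => simp at h
    subst hl
    simp [PySem.Chars.replace.go, repSpec]
  | succ n ih =>
    intro l acc h
    cases l with
    | nil => simp [PySem.Chars.replace.go, repSpec]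
    | cons c t =>
      by_cases hp : List.isPrefixOf (o0 :: oRest) (c :: t) = true
      · rw [show PySem.Chars.replace.go (o0 :: oRest) new (n+1) (c :: t) acc
            = PySem.Chars.replace.go (o0 :: oRest) new n (List.drop (o0 :: oRest).length (c :: t)) (new.reverse ++ acc) by
              simp [PySem.Chars.replace.go, hp]]
        rw [ih _ _ (by simp at h ⊢; omega)]
        rw [repSpec, if_pos hp]
        simp
      · rw [show PySem.Chars.replace.go (o0 :: oRest) new (n+1) (c :: t) acc
            = PySem.Chars.replace.go (o0 :: oRest) new n t (c :: acc) by
              simp [PySem.Chars.replace.go, hp]]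
        rw [ih _ _ (by simp at h; omega)]
        rw [repSpec, if_neg hp]
        simp

lemma replace_eq (l : List Char) (o0 : Char) (oRest new : List Char) :
    PySem.Chars.replace l (o0 :: oRest) new = repSpec o0 oRest new l := by
  rw [PySem.Chars.replace]
  simp only [List.isEmpty_cons, if_false, Bool.false_eq_true]
  rw [go_eq o0 oRest new l.length l [] (le_refl _)]
  simp

lemma repSpec_append (o0 : Char) (oRest new : List Char) :
    ∀ (w u : List Char), (∀ a ∈ w, a ≠ o0) →
      repSpec o0 oRest new (w ++ u) = w ++ repSpec o0 oRest new u := by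
  intro w
  induction w with
  | nil => simp
  | cons a w' ih =>
    intro u hw
    have ha : a ≠ o0 := hw a (List.mem_cons_self)
    rw [List.cons_append, repSpec,
        if_neg (by simp [List.isPrefixOf]; intro h; exact absurd h.symm ha),
        ih u (fun b hb => hw b (List.mem_cons_of_mem _ hb))]
    simp


lemma repSpec_self (o0 : Char) (oRest new u : List Char) :
    repSpec o0 oRest new ((o0 :: oRest) ++ u) = new ++ repSpec o0 oRest new u := by
  rw [List.cons_append, repSpec]
  rw [if_pos (by simpa using List.isPrefixOf_iff_prefix.mpr ⟨u, rfl⟩)]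
  congr 1
  rw [show (oRest.length + 1) = (o0 :: oRest).length by simp]
  rw [← List.cons_append, List.drop_left]

lemma isPrefixOf_repSpec (o0 : Char) (oRest : List Char) (n0 : Char) (nRest : List Char) :
    ∀ (w t : List Char), (∀ a ∈ w, a ≠ n0) →
      List.isPrefixOf w (repSpec o0 oRest (n0 :: nRest) t) = true →
      List.isPrefixOf w t = true := by
  intro w
  induction w with
  | nil => intro t _ _; simp [List.isPrefixOf]
  | cons a w' ih =>
    intro t hw hpre
    have ha : a ≠ n0 := hw a (List.mem_cons_self)
    cases t with
    | nil => rw [repSpec] at hpre; simp [List.isPrefixOf] at hpre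
    | cons c t' =>
      by_cases hp : List.isPrefixOf (o0 :: oRest) (c :: t') = true
      · rw [repSpec, if_pos hp] at hpre
        simp [List.isPrefixOf] at hpre
        exact absurd hpre.1 ha
      · rw [repSpec, if_neg hp] at hpre
        simp [List.isPrefixOf] at hpre ⊢
        refine ⟨hpre.1, ?_⟩
        have := ih t' (fun b hb => hw b (List.mem_cons_of_mem _ hb)) (by simpa [List.isPrefixOf_iff_prefix] using hpre.2)
        simpa [List.isPrefixOf_iff_prefix] using this

lemma main_eq (l : List Char) :
    repSpec 'f' ['l','y'] ['d','i','v','e']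
      (repSpec 'c' ['a','r'] ['b','i','k','e']
        (repSpec 'g' ['o','o','d'] ['b','a','d']
          (repSpec 'h' ['a','p','p','y'] ['s','a','d'] l))) = scanRep l := by
  induction l using scanRep.induct with
  | case1 => rw [repSpec, repSpec, repSpec, repSpec, scanRep]
  | case2 c t h ih =>
    rw [scanRep, if_pos h]
    have heq : ['h','a','p','p','y'] ++ List.drop 5 (c :: t) = c :: t := by
      simpa using List.prefix_iff_eq_append.mp (List.isPrefixOf_iff_prefix.mp h)
    conv_lhs => rw [← heq]
    rw [ repSpec_self,
        repSpec_append 'g' ['o','o','d'] ['b','a','d'] ['s','a','d'] _ (by simp),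
        repSpec_append 'c' ['a','r'] ['b','i','k','e'] ['s','a','d'] _ (by simp),
        repSpec_append 'f' ['l','y'] ['d','i','v','e'] ['s','a','d'] _ (by simp),
        ih]
  | case3 c t h1 h2 ih =>
    rw [scanRep, if_neg h1, if_pos h2]
    have heq : ['g','o','o','d'] ++ List.drop 4 (c :: t) = c :: t := by
      simpa using List.prefix_iff_eq_append.mp (List.isPrefixOf_iff_prefix.mp h2)
    conv_lhs => rw [← heq]
    rw [repSpec_append 'h' ['a','p','p','y'] ['s','a','d'] ['g','o','o','d'] _ (by simp),
        repSpec_self,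
        repSpec_append 'c' ['a','r'] ['b','i','k','e'] ['b','a','d'] _ (by simp),
        repSpec_append 'f' ['l','y'] ['d','i','v','e'] ['b','a','d'] _ (by simp),
        ih]
  | case4 c t h1 h2 h3 ih =>
    rw [scanRep, if_neg h1, if_neg h2, if_pos h3]
    have heq : ['c','a','r'] ++ List.drop 3 (c :: t) = c :: t := by
      simpa using List.prefix_iff_eq_append.mp (List.isPrefixOf_iff_prefix.mp h3)
    conv_lhs => rw [← heq]
    rw [repSpec_append 'h' ['a','p','p','y'] ['s','a','d'] ['c','a','r'] _ (by simp),
        repSpec_append 'g' ['o','o','d'] ['b','a','d'] ['c','a','r'] _ (by simp),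
        repSpec_self,
        repSpec_append 'f' ['l','y'] ['d','i','v','e'] ['b','i','k','e'] _ (by simp),
        ih]
  | case5 c t h1 h2 h3 h4 ih =>
    rw [scanRep, if_neg h1, if_neg h2, if_neg h3, if_pos h4]
    have heq : ['f','l','y'] ++ List.drop 3 (c :: t) = c :: t := by
      simpa using List.prefix_iff_eq_append.mp (List.isPrefixOf_iff_prefix.mp h4)
    conv_lhs => rw [← heq]
    rw [repSpec_append 'h' ['a','p','p','y'] ['s','a','d'] ['f','l','y'] _ (by simp),
        repSpec_append 'g' ['o','o','d'] ['b','a','d'] ['f','l','y'] _ (by simp),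
        repSpec_append 'c' ['a','r'] ['b','i','k','e'] ['f','l','y'] _ (by simp),
        repSpec_self,
        ih]
  | case6 c t h1 h2 h3 h4 ih =>
    rw [scanRep, if_neg h1, if_neg h2, if_neg h3, if_neg h4]
    have e1 : repSpec 'h' ['a','p','p','y'] ['s','a','d'] (c :: t)
        = c :: repSpec 'h' ['a','p','p','y'] ['s','a','d'] t := by
      rw [repSpec, if_neg h1]
    have hg : ¬ (List.isPrefixOf ['g','o','o','d']
        (c :: repSpec 'h' ['a','p','p','y'] ['s','a','d'] t) = true) := by
      intro hcon
      rw [← e1] at hcon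
      exact h2 (isPrefixOf_repSpec 'h' ['a','p','p','y'] 's' ['a','d'] ['g','o','o','d'] (c :: t) (by simp) hcon)
    have e2 : repSpec 'g' ['o','o','d'] ['b','a','d'] (c :: repSpec 'h' ['a','p','p','y'] ['s','a','d'] t)
        = c :: repSpec 'g' ['o','o','d'] ['b','a','d'] (repSpec 'h' ['a','p','p','y'] ['s','a','d'] t) := by
      rw [repSpec, if_neg hg]
    have hc : ¬ (List.isPrefixOf ['c','a','r']
        (c :: repSpec 'g' ['o','o','d'] ['b','a','d'] (repSpec 'h' ['a','p','p','y'] ['s','a','d'] t)) = true) := by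
      intro hcon
      rw [← e2] at hcon
      have hcon2 := isPrefixOf_repSpec 'g' ['o','o','d'] 'b' ['a','d'] ['c','a','r'] _ (by simp) hcon
      rw [← e1] at hcon2
      exact h3 (isPrefixOf_repSpec 'h' ['a','p','p','y'] 's' ['a','d'] ['c','a','r'] (c :: t) (by simp) hcon2)
    have e3 : repSpec 'c' ['a','r'] ['b','i','k','e'] (c :: repSpec 'g' ['o','o','d'] ['b','a','d'] (repSpec 'h' ['a','p','p','y'] ['s','a','d'] t))
        = c :: repSpec 'c' ['a','r'] ['b','i','k','e'] (repSpec 'g' ['o','o','d'] ['b','a','d'] (repSpec 'h' ['a','p','p','y'] ['s','a','d'] t)) := by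
      rw [repSpec, if_neg hc]
    have hf : ¬ (List.isPrefixOf ['f','l','y']
        (c :: repSpec 'c' ['a','r'] ['b','i','k','e'] (repSpec 'g' ['o','o','d'] ['b','a','d'] (repSpec 'h' ['a','p','p','y'] ['s','a','d'] t))) = true) := by
      intro hcon
      rw [← e3] at hcon
      have hcon2 := isPrefixOf_repSpec 'c' ['a','r'] 'b' ['i','k','e'] ['f','l','y'] _ (by simp) hcon
      rw [← e2] at hcon2
      have hcon3 := isPrefixOf_repSpec 'g' ['o','o','d'] 'b' ['a','d'] ['f','l','y'] _ (by simp) hcon2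
      rw [← e1] at hcon3
      exact h4 (isPrefixOf_repSpec 'h' ['a','p','p','y'] 's' ['a','d'] ['f','l','y'] (c :: t) (by simp) hcon3)
    have e4 : repSpec 'f' ['l','y'] ['d','i','v','e'] (c :: repSpec 'c' ['a','r'] ['b','i','k','e'] (repSpec 'g' ['o','o','d'] ['b','a','d'] (repSpec 'h' ['a','p','p','y'] ['s','a','d'] t)))
        = c :: repSpec 'f' ['l','y'] ['d','i','v','e'] (repSpec 'c' ['a','r'] ['b','i','k','e'] (repSpec 'g' ['o','o','d'] ['b','a','d'] (repSpec 'h' ['a','p','p','y'] ['s','a','d'] t))) := by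
      rw [repSpec, if_neg hf]
    rw [e1, e2, e3, e4, ih]

-- ===== VERDICT (by name: the statement is the Claim_ definition above) =====
theorem ContentModel_spec : Claim_equal_ContentModel := by
  intro codeWindow commitMessage prevEdits _hd _hp
  unfold Spec_ContentModel ContentModel ContentModel_alt
  simp only [List.foldl, replace_eq, main_eq]
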